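-- pv_equiv track=rewrite | github.com/Nuloi/https-github.com-Nuloi-baekjoon | 백준/Silver/1388. 바닥 장식/바닥 장식.py | dfs
-- ===== SOURCE A (Python) =====
-- def dfs(N, M, floor):
--     visited = [[False for _ in range(M)] for _ in range(N)]
--     planks = 0
--
--     for i in range(N):
--         for j in range(M):
--             if not visited[i][j]:
--                 if floor[i][j] == '-':
--                     planks += 1
--                     while j < M and floor[i][j] == '-':
--                         visited[i][j] = True
--                         j += 1
--                 elif floor[i][j] == '|':
--                     planks += 1
--                     k = i
--                     while k < N and floor[k][j] == '|':
--                         visited[k][j] = True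
--                         k += 1
--     return planks
-- ===== SOURCE B (Python) =====
-- def dfs(N, M, floor):
--     planks = 0
--     for i in range(N):
--         for j in range(M):
--             c = floor[i][j]
--             if c == '-' and (j == 0 or floor[i][j-1] != '-'):
--                 planks += 1
--             elif c == '|' and (i == 0 or floor[i-1][j] != '|'):
--                 planks += 1
--     return planks
-- ===== Notes on version B (the rewrite author's own statement) =====
-- stated objective: simpler
-- what changed: Replaced the visited matrix and the two marking while-loops by a single pass that counts each maximal plank once at its start cell (left edge of a '-' run, top edge of a '|' run).
import Mathlib
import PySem

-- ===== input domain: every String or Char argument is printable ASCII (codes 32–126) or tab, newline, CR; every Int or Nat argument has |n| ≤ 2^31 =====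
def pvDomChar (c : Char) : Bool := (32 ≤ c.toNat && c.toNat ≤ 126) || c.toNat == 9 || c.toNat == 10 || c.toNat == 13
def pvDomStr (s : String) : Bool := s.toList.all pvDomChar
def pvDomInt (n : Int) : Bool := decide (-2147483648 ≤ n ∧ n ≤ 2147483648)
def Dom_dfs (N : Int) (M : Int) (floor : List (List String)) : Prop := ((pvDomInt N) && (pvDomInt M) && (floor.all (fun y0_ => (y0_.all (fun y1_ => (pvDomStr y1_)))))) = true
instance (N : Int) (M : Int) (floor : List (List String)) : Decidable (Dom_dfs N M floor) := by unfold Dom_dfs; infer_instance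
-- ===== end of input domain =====

-- B removes A's visited matrix and both marking while-loops: it counts each maximal
-- plank once at its start cell (left edge of a '-' run / top edge of a '|' run).

-- ===== PORT A =====
-- floor[i][j]; exact under Pre_dfs, where every read index is in range (the .getD
-- defaults are never reached there; Python raises IndexError exactly outside Pre_dfs).
def pvCell (floor : List (List String)) (i j : Int) : String :=
  (PySem.List.pyGet? ((PySem.List.pyGet? floor i).getD []) j).getD ""

-- visited[i][j]; under Pre_dfs every read is in range, so the defaults are never reached.
def pvVGet (v : List (List Bool)) (i j : Int) : Bool :=
  (PySem.List.pyGet? ((PySem.List.pyGet? v i).getD []) j).getD false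

-- visited[i][j] = True; indices are nonnegative and in range at every call site under Pre_dfs.
def pvVSet (v : List (List Bool)) (i j : Int) : List (List Bool) :=
  v.modify i.toNat (fun row => row.set j.toNat true)

-- while j < M and floor[i][j] == '-': visited[i][j] = True; j += 1
def pvMarkH (M : Int) (floor : List (List String)) (i : Int) (v : List (List Bool)) (j : Int) :
    List (List Bool) :=
  if h : j < M ∧ pvCell floor i j = "-" then pvMarkH M floor i (pvVSet v i j) (j + 1) else v
termination_by (M - j).toNat
decreasing_by omega

-- k = i; while k < N and floor[k][j] == '|': visited[k][j] = True; k += 1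
def pvMarkV (N : Int) (floor : List (List String)) (j : Int) (v : List (List Bool)) (k : Int) :
    List (List Bool) :=
  if h : k < N ∧ pvCell floor k j = "|" then pvMarkV N floor j (pvVSet v k j) (k + 1) else v
termination_by (N - k).toNat
decreasing_by omega

-- the body of A's inner loop, acting on the state (visited, planks)
def pvStepA (N M : Int) (floor : List (List String)) (i : Int)
    (s : List (List Bool) × Int) (j : Int) : List (List Bool) × Int :=
  if pvVGet s.1 i j = false then
    if pvCell floor i j = "-" then (pvMarkH M floor i s.1 j, s.2 + 1)
    else if pvCell floor i j = "|" then (pvMarkV N floor j s.1 i, s.2 + 1)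
    else s
  else s

def dfs (N : Int) (M : Int) (floor : List (List String)) : Int :=
  (((PySem.List.pyRange 0 N 1).foldl
      (fun s i => (PySem.List.pyRange 0 M 1).foldl (pvStepA N M floor i) s)
      ((PySem.List.pyRange 0 N 1).map (fun _ => (PySem.List.pyRange 0 M 1).map (fun _ => false)), 0))).2

-- ===== PORT B =====
-- contribution of cell (i, j): 1 iff it is the start cell of a maximal plank
def pvStepB (floor : List (List String)) (i j : Int) : Int :=
  if pvCell floor i j = "-" ∧ (j = 0 ∨ pvCell floor i (j - 1) ≠ "-") then 1
  else if pvCell floor i j = "|" ∧ (i = 0 ∨ pvCell floor (i - 1) j ≠ "|") then 1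
  else 0

def dfs_alt (N : Int) (M : Int) (floor : List (List String)) : Int :=
  (PySem.List.pyRange 0 N 1).foldl
    (fun p i => (PySem.List.pyRange 0 M 1).foldl (fun p j => p + pvStepB floor i j) p) 0

-- ===== PRECONDITION & SPEC =====
-- Pre_dfs holds exactly when Python A returns: when both loops are nonempty, A reads
-- every cell (i, j) with i < N, j < M, and raises IndexError iff one is out of range.
def Pre_dfs (N : Int) (M : Int) (floor : List (List String)) : Prop :=
  0 < N → 0 < M →
    (N ≤ (floor.length : Int) ∧ ∀ row ∈ floor.take N.toNat, M ≤ (row.length : Int))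
instance (N : Int) (M : Int) (floor : List (List String)) : Decidable (Pre_dfs N M floor) := by
  unfold Pre_dfs; infer_instance

def pvWitness_dfs : Int × Int × List (List String) := (2, 2, [["-", "-"], ["|", "x"]])

def Spec_dfs (N : Int) (M : Int) (floor : List (List String)) (out : Int) : Prop := out = dfs_alt N M floor
instance (N : Int) (M : Int) (floor : List (List String)) (out : Int) : Decidable (Spec_dfs N M floor out) := by unfold Spec_dfs; infer_instance

-- ===== CLAIM (what is proved, stated in full; the proofs are below) =====
def Claim_equal_dfs : Prop := ∀ (N : Int) (M : Int) (floor : List (List String)), Dom_dfs N M floor → Pre_dfs N M floor → Spec_dfs N M floor (dfs N M floor)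

-- ===== LEMMAS AND PROOFS =====

-- start column of the maximal '-' segment of row i that ends just left of column j
def pvHS (floor : List (List String)) (i : Int) (j : Int) : Int :=
  if h : 0 < j ∧ pvCell floor i (j - 1) = "-" then pvHS floor i (j - 1) else j
termination_by j.toNat
decreasing_by omega

-- top row of the maximal '|' segment of column j that ends just above row i
def pvVT (floor : List (List String)) (j : Int) (i : Int) : Int :=
  if h : 0 < i ∧ pvCell floor (i - 1) j = "|" then pvVT floor j (i - 1) else i
termination_by i.toNat
decreasing_by omega

-- the visited matrix of A after processing all cells lexicographically before (i, j)
def pvMarked (floor : List (List String)) (i j a b : Int) : Bool :=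
  (decide (pvCell floor a b = "-") &&
    (decide (a < i) || (decide (a = i) && decide (pvHS floor a b < j)))) ||
  (decide (pvCell floor a b = "|") &&
    (decide (pvVT floor b a < i) || (decide (pvVT floor b a = i) && decide (b < j))))

def pvShape (v : List (List Bool)) (n m : Nat) : Prop :=
  v.length = n ∧ ∀ (k : Nat) (h : k < v.length), (v[k]).length = m

def pvInv (floor : List (List String)) (N M i j : Int) (v : List (List Bool)) : Prop :=
  ∀ a b : Int, 0 ≤ a → a < N → 0 ≤ b → b < M → pvVGet v a b = pvMarked floor i j a b

theorem pvHS_le (floor : List (List String)) (i j : Int) : pvHS floor i j ≤ j := by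
  induction j using pvHS.induct floor i with
  | case1 j h ih => rw [pvHS]; rw [dif_pos h]; omega
  | case2 j h => rw [pvHS]; rw [dif_neg h]

theorem pvHS_nonneg (floor : List (List String)) (i j : Int) (h0 : 0 ≤ j) : 0 ≤ pvHS floor i j := by
  induction j using pvHS.induct floor i with
  | case1 j h ih => rw [pvHS, dif_pos h]; exact ih (by omega)
  | case2 j h => rw [pvHS, dif_neg h]; omega

theorem pvHS_stop (floor : List (List String)) (i j : Int) (h0 : 0 < pvHS floor i j) :
    pvCell floor i (pvHS floor i j - 1) ≠ "-" := by
  induction j using pvHS.induct floor i with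
  | case1 j h ih => rw [pvHS, dif_pos h] at h0 ⊢; exact ih h0
  | case2 j h => rw [pvHS, dif_neg h] at h0 ⊢; intro hc; exact h ⟨h0, hc⟩

theorem pvHS_all (floor : List (List String)) (i : Int) (x t : Int)
    (h1 : pvHS floor i x ≤ t) (h2 : t < x) : pvCell floor i t = "-" := by
  induction x using pvHS.induct floor i with
  | case1 x h ih =>
    rw [pvHS, dif_pos h] at h1
    rcases eq_or_lt_of_le (show t ≤ x - 1 by omega) with he | hl
    · rw [he]; exact h.2
    · exact ih h1 hl
  | case2 x h => rw [pvHS, dif_neg h] at h1; omega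

theorem pvHS_succ (floor : List (List String)) (i j : Int) (h0 : 0 ≤ j) :
    pvHS floor i (j + 1) = if pvCell floor i j = "-" then pvHS floor i j else j + 1 := by
  rw [pvHS]
  by_cases hc : pvCell floor i j = "-"
  · rw [dif_pos (by simpa using ⟨by omega, hc⟩), if_pos hc]; norm_num
  · rw [dif_neg (by simp; intro _; simpa using hc), if_neg hc]

theorem pvHS_eq_self_iff (floor : List (List String)) (i j : Int) (h0 : 0 ≤ j) :
    pvHS floor i j = j ↔ (j = 0 ∨ pvCell floor i (j - 1) ≠ "-") := by
  rw [pvHS]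
  split
  · rename_i h
    have := pvHS_le floor i (j - 1)
    constructor
    · intro he; omega
    · intro hc; rcases hc with hc | hc
      · omega
      · exact absurd h.2 hc
  · rename_i h
    simp only [true_iff]
    by_cases hj : j = 0
    · exact Or.inl hj
    · exact Or.inr (fun hc => h ⟨by omega, hc⟩)

theorem pvVT_le (floor : List (List String)) (j i : Int) : pvVT floor j i ≤ i := by
  induction i using pvVT.induct floor j with
  | case1 i h ih => rw [pvVT]; rw [dif_pos h]; omega
  | case2 i h => rw [pvVT]; rw [dif_neg h]

theorem pvVT_nonneg (floor : List (List String)) (j i : Int) (h0 : 0 ≤ i) : 0 ≤ pvVT floor j i := by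
  induction i using pvVT.induct floor j with
  | case1 i h ih => rw [pvVT, dif_pos h]; exact ih (by omega)
  | case2 i h => rw [pvVT, dif_neg h]; omega

theorem pvVT_stop (floor : List (List String)) (j i : Int) (h0 : 0 < pvVT floor j i) :
    pvCell floor (pvVT floor j i - 1) j ≠ "|" := by
  induction i using pvVT.induct floor j with
  | case1 i h ih => rw [pvVT, dif_pos h] at h0 ⊢; exact ih h0
  | case2 i h => rw [pvVT, dif_neg h] at h0 ⊢; intro hc; exact h ⟨h0, hc⟩

theorem pvVT_all (floor : List (List String)) (j : Int) (x t : Int)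
    (h1 : pvVT floor j x ≤ t) (h2 : t < x) : pvCell floor t j = "|" := by
  induction x using pvVT.induct floor j with
  | case1 x h ih =>
    rw [pvVT, dif_pos h] at h1
    rcases eq_or_lt_of_le (show t ≤ x - 1 by omega) with he | hl
    · rw [he]; exact h.2
    · exact ih h1 hl
  | case2 x h => rw [pvVT, dif_neg h] at h1; omega

theorem pvVT_succ (floor : List (List String)) (j i : Int) (h0 : 0 ≤ i) :
    pvVT floor j (i + 1) = if pvCell floor i j = "|" then pvVT floor j i else i + 1 := by
  rw [pvVT]
  by_cases hc : pvCell floor i j = "|"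
  · rw [dif_pos (by simpa using ⟨by omega, hc⟩), if_pos hc]; norm_num
  · rw [dif_neg (by simp; intro _; simpa using hc), if_neg hc]

theorem pvVT_eq_self_iff (floor : List (List String)) (j i : Int) (h0 : 0 ≤ i) :
    pvVT floor j i = i ↔ (i = 0 ∨ pvCell floor (i - 1) j ≠ "|") := by
  rw [pvVT]
  split
  · rename_i h
    have := pvVT_le floor j (i - 1)
    constructor
    · intro he; omega
    · intro hc; rcases hc with hc | hc
      · omega
      · exact absurd h.2 hc
  · rename_i h
    simp only [true_iff]
    by_cases hj : i = 0
    · exact Or.inl hj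
    · exact Or.inr (fun hc => h ⟨by omega, hc⟩)

theorem pvShape_vset (v : List (List Bool)) (n m : Nat) (i j : Int) (hs : pvShape v n m) :
    pvShape (pvVSet v i j) n m := by
  obtain ⟨h1, h2⟩ := hs
  refine ⟨by simpa [pvVSet] using h1, ?_⟩
  intro k hk
  simp only [pvVSet, List.length_modify] at hk
  simp only [pvVSet, List.getElem_modify]
  split
  · rename_i he; rw [List.length_set]; subst he; exact h2 _ hk
  · exact h2 _ hk

theorem pvVGet_eq (v : List (List Bool)) (a b : Int) (ha : 0 ≤ a) (hb : 0 ≤ b) :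
    pvVGet v a b = ((v[a.toNat]?.getD [])[b.toNat]?.getD false) := by
  rw [pvVGet, PySem.List.pyGet?_of_nonneg _ ha, PySem.List.pyGet?_of_nonneg _ hb]

theorem pvVGet_vset (v : List (List Bool)) (n m : Nat) (hs : pvShape v n m)
    (i j a b : Int) (hi : 0 ≤ i) (him : i < (n : Int)) (hj : 0 ≤ j) (hjm : j < (m : Int))
    (ha : 0 ≤ a) (hb : 0 ≤ b) :
    pvVGet (pvVSet v i j) a b = if a = i ∧ b = j then true else pvVGet v a b := by
  obtain ⟨h1, h2⟩ := hs
  have hilt : i.toNat < v.length := by omega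
  rw [pvVGet_eq _ _ _ ha hb, pvVGet_eq _ _ _ ha hb]
  simp only [pvVSet, List.getElem?_modify]
  by_cases hai : a = i
  · subst hai
    rw [List.getElem?_eq_getElem hilt]
    simp only [Functor.map, Option.map_some, Option.getD_some, if_true, true_and]
    have hrl : (v[a.toNat]).length = m := h2 _ hilt
    rw [List.getElem?_set]
    by_cases hbj : b = j
    · subst hbj
      rw [if_pos rfl, if_pos rfl, if_pos (by omega)]
      simp
    · rw [if_neg (by omega : ¬ j.toNat = b.toNat), if_neg (by simpa using hbj)]
  · simp only [if_neg (by omega : ¬ i.toNat = a.toNat), if_neg (show ¬ (a = i ∧ b = j) by tauto)]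
    cases v[a.toNat]? <;> simp [Functor.map]

theorem pvShape_markH (M : Int) (floor : List (List String)) (i : Int) (n m : Nat)
    (v : List (List Bool)) (j : Int) (hs : pvShape v n m) :
    pvShape (pvMarkH M floor i v j) n m := by
  induction v, j using pvMarkH.induct M floor i with
  | case1 v j h ih => rw [pvMarkH, dif_pos h]; exact ih (pvShape_vset _ _ _ _ _ hs)
  | case2 v j h => rw [pvMarkH, dif_neg h]; exact hs

theorem pvShape_markV (N : Int) (floor : List (List String)) (j : Int) (n m : Nat)
    (v : List (List Bool)) (k : Int) (hs : pvShape v n m) :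
    pvShape (pvMarkV N floor j v k) n m := by
  induction v, k using pvMarkV.induct N floor j with
  | case1 v k h ih => rw [pvMarkV, dif_pos h]; exact ih (pvShape_vset _ _ _ _ _ hs)
  | case2 v k h => rw [pvMarkV, dif_neg h]; exact hs

theorem pvMarkH_get (M : Int) (floor : List (List String)) (i : Int) (n m : Nat)
    (hM : M ≤ (m : Int)) (hi : 0 ≤ i) (him : i < (n : Int))
    (v : List (List Bool)) (j : Int) (hs : pvShape v n m) (hj : 0 ≤ j)
    (a b : Int) (ha : 0 ≤ a) (hb : 0 ≤ b) :
    pvVGet (pvMarkH M floor i v j) a b =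
      (pvVGet v a b ||
        (decide (a = i) && decide (j ≤ b) && decide (b < M) && decide (pvHS floor i (b + 1) ≤ j))) := by
  induction v, j using pvMarkH.induct M floor i with
  | case1 v j h ih =>
    rw [pvMarkH, dif_pos h]
    have hvs := pvShape_vset v n m i j hs
    rw [ih hvs (by omega)]
    rw [pvVGet_vset v n m hs i j a b hi him hj (by omega) ha hb]
    have fact1 : pvHS floor i (j + 1) ≤ j := by
      rw [pvHS_succ floor i j hj, if_pos h.2]; exact pvHS_le floor i j
    have fact2 : ∀ b' : Int, pvHS floor i (b' + 1) ≤ j + 1 → j + 1 ≤ b' →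
        pvHS floor i (b' + 1) ≤ j := by
      intro b' h1 h2
      rcases lt_or_eq_of_le h1 with hl | he
      · omega
      · exfalso
        have := pvHS_stop floor i (b' + 1) (by omega)
        rw [he] at this
        simp only [add_sub_cancel_right] at this
        exact this h.2
    rw [Bool.eq_iff_iff]
    by_cases hab : a = i ∧ b = j
    · rw [if_pos hab]
      obtain ⟨rfl, rfl⟩ := hab
      simp only [Bool.or_eq_true, Bool.and_eq_true, decide_eq_true_iff, true_or, true_iff]
      exact Or.inr ⟨⟨⟨by trivial, le_refl _⟩, h.1⟩, fact1⟩
    · rw [if_neg hab]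
      simp only [Bool.or_eq_true, Bool.and_eq_true, decide_eq_true_iff]
      constructor
      · rintro (hP | ⟨⟨⟨h1, h2⟩, h3⟩, h4⟩)
        · exact Or.inl hP
        · exact Or.inr ⟨⟨⟨h1, by omega⟩, h3⟩, fact2 b h4 h2⟩
      · rintro (hP | ⟨⟨⟨h1, h2⟩, h3⟩, h4⟩)
        · exact Or.inl hP
        · exact Or.inr ⟨⟨⟨h1, by omega⟩, h3⟩, by omega⟩
  | case2 v j h =>
    rw [pvMarkH, dif_neg h, Bool.eq_iff_iff]
    simp only [Bool.or_eq_true, Bool.and_eq_true, decide_eq_true_iff]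
    constructor
    · exact Or.inl
    · rintro (hP | ⟨⟨⟨h1, h2⟩, h3⟩, h4⟩)
      · exact hP
      · exact absurd ⟨by omega, pvHS_all floor i (b + 1) j h4 (by omega)⟩ h

theorem pvMarkV_get (N : Int) (floor : List (List String)) (j : Int) (n m : Nat)
    (hN : N ≤ (n : Int)) (hj : 0 ≤ j) (hjm : j < (m : Int))
    (v : List (List Bool)) (k : Int) (hs : pvShape v n m) (hk : 0 ≤ k)
    (a b : Int) (ha : 0 ≤ a) (hb : 0 ≤ b) :
    pvVGet (pvMarkV N floor j v k) a b =
      (pvVGet v a b ||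
        (decide (b = j) && decide (k ≤ a) && decide (a < N) && decide (pvVT floor j (a + 1) ≤ k))) := by
  induction v, k using pvMarkV.induct N floor j with
  | case1 v k h ih =>
    rw [pvMarkV, dif_pos h]
    have hvs := pvShape_vset v n m k j hs
    rw [ih hvs (by omega)]
    rw [pvVGet_vset v n m hs k j a b hk (by omega) hj hjm ha hb]
    have fact1 : pvVT floor j (k + 1) ≤ k := by
      rw [pvVT_succ floor j k hk, if_pos h.2]; exact pvVT_le floor j k
    have fact2 : ∀ a' : Int, pvVT floor j (a' + 1) ≤ k + 1 → k + 1 ≤ a' →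
        pvVT floor j (a' + 1) ≤ k := by
      intro a' h1 h2
      rcases lt_or_eq_of_le h1 with hl | he
      · omega
      · exfalso
        have := pvVT_stop floor j (a' + 1) (by omega)
        rw [he] at this
        simp only [add_sub_cancel_right] at this
        exact this h.2
    rw [Bool.eq_iff_iff]
    by_cases hab : a = k ∧ b = j
    · rw [if_pos hab]
      obtain ⟨rfl, rfl⟩ := hab
      simp only [Bool.or_eq_true, Bool.and_eq_true, decide_eq_true_iff, true_or, true_iff]
      exact Or.inr ⟨⟨⟨by trivial, le_refl _⟩, h.1⟩, fact1⟩
    · rw [if_neg hab]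
      simp only [Bool.or_eq_true, Bool.and_eq_true, decide_eq_true_iff]
      constructor
      · rintro (hP | ⟨⟨⟨h1, h2⟩, h3⟩, h4⟩)
        · exact Or.inl hP
        · exact Or.inr ⟨⟨⟨h1, by omega⟩, h3⟩, fact2 a h4 h2⟩
      · rintro (hP | ⟨⟨⟨h1, h2⟩, h3⟩, h4⟩)
        · exact Or.inl hP
        · exact Or.inr ⟨⟨⟨h1, by omega⟩, h3⟩, by omega⟩
  | case2 v k h =>
    rw [pvMarkV, dif_neg h, Bool.eq_iff_iff]
    simp only [Bool.or_eq_true, Bool.and_eq_true, decide_eq_true_iff]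
    constructor
    · exact Or.inl
    · rintro (hP | ⟨⟨⟨h1, h2⟩, h3⟩, h4⟩)
      · exact hP
      · exact absurd ⟨by omega, pvVT_all floor j (a + 1) k h4 (by omega)⟩ h


theorem pvMarked_stepH (floor : List (List String)) (M i j : Int)
    (hj0 : 0 ≤ j) (hjM : j < M) (hc : pvCell floor i j = "-")
    (a b : Int) (hb0 : 0 ≤ b) (hbM : b < M) :
    pvMarked floor i (j + 1) a b =
      (pvMarked floor i j a b ||
        (decide (a = i) && decide (j ≤ b) && decide (b < M) && decide (pvHS floor i (b + 1) ≤ j))) := by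
  rw [Bool.eq_iff_iff]
  simp only [pvMarked, Bool.or_eq_true, Bool.and_eq_true, decide_eq_true_iff]
  constructor
  · rintro (⟨hca, (hai | ⟨hae, hhs⟩)⟩ | ⟨hca, (hvt | ⟨hvt, hbj⟩)⟩)
    · exact Or.inl (Or.inl ⟨hca, Or.inl hai⟩)
    · by_cases hlt : pvHS floor a b < j
      · exact Or.inl (Or.inl ⟨hca, Or.inr ⟨hae, hlt⟩⟩)
      · have hbsj : pvHS floor a b = j := by omega
        have hjb : j ≤ b := by have := pvHS_le floor a b; omega
        refine Or.inr ⟨⟨⟨hae, hjb⟩, hbM⟩, ?_⟩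
        rw [← hae, pvHS_succ floor a b hb0, if_pos hca, hbsj]
    · exact Or.inl (Or.inr ⟨hca, Or.inl hvt⟩)
    · by_cases hbj' : b < j
      · exact Or.inl (Or.inr ⟨hca, Or.inr ⟨hvt, hbj'⟩⟩)
      · exfalso
        have hbje : b = j := by omega
        subst hbje
        have hia : pvVT floor b a ≤ a := pvVT_le floor b a
        rcases eq_or_lt_of_le (show i ≤ a by omega) with he | hl
        · rw [← he] at hca; exact absurd (hc.symm.trans hca) (by decide)
        · have := pvVT_all floor b a i (le_of_eq hvt) hl
          exact absurd (hc.symm.trans this) (by decide)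
  · rintro ((⟨hca, (hai | ⟨hae, hhs⟩)⟩ | ⟨hca, (hvt | ⟨hvt, hbj⟩)⟩) | ⟨⟨⟨hae, hjb⟩, _⟩, h4⟩)
    · exact Or.inl ⟨hca, Or.inl hai⟩
    · exact Or.inl ⟨hca, Or.inr ⟨hae, by omega⟩⟩
    · exact Or.inr ⟨hca, Or.inl hvt⟩
    · exact Or.inr ⟨hca, Or.inr ⟨hvt, by omega⟩⟩
    · rw [← hae] at h4
      have hcb : pvCell floor a b = "-" := pvHS_all floor a (b + 1) b (le_trans h4 hjb) (by omega)
      have hse : pvHS floor a (b + 1) = pvHS floor a b := by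
        rw [pvHS_succ floor a b hb0, if_pos hcb]
      exact Or.inl ⟨hcb, Or.inr ⟨hae, by omega⟩⟩
theorem pvMarked_noopH (floor : List (List String)) (i j : Int)
    (hj0 : 0 ≤ j) (hc : pvCell floor i j = "-") (hm : pvHS floor i j < j)
    (a b : Int) (hb0 : 0 ≤ b) :
    pvMarked floor i (j + 1) a b = pvMarked floor i j a b := by
  have hjpos : 0 < j := by have := pvHS_nonneg floor i j hj0; omega
  have hleft : pvCell floor i (j - 1) = "-" := by
    have := (pvHS_eq_self_iff floor i j hj0).not
    by_contra hne
    exact absurd ((pvHS_eq_self_iff floor i j hj0).mpr (Or.inr hne)) (by omega)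
  rw [Bool.eq_iff_iff]
  simp only [pvMarked, Bool.or_eq_true, Bool.and_eq_true, decide_eq_true_iff]
  constructor
  · rintro (⟨hca, (hai | ⟨rfl, hhs⟩)⟩ | ⟨hca, (hvt | ⟨hvt, hbj⟩)⟩)
    · exact Or.inl ⟨hca, Or.inl hai⟩
    · by_cases hlt : pvHS floor a b < j
      · exact Or.inl ⟨hca, Or.inr ⟨rfl, hlt⟩⟩
      · exfalso
        have hbsj : pvHS floor a b = j := by omega
        have := pvHS_stop floor a b (by omega)
        rw [hbsj] at this
        exact this hleft
    · exact Or.inr ⟨hca, Or.inl hvt⟩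
    · by_cases hbj' : b < j
      · exact Or.inr ⟨hca, Or.inr ⟨hvt, hbj'⟩⟩
      · exfalso
        have hbje : b = j := by omega
        subst hbje
        have hia : pvVT floor b a ≤ a := pvVT_le floor b a
        rcases eq_or_lt_of_le (show i ≤ a by omega) with he | hl
        · subst he; exact absurd (hc.symm.trans hca) (by decide)
        · have := pvVT_all floor b a i (le_of_eq hvt) hl
          exact absurd (hc.symm.trans this) (by decide)
  · rintro (⟨hca, (hai | ⟨rfl, hhs⟩)⟩ | ⟨hca, (hvt | ⟨hvt, hbj⟩)⟩)
    · exact Or.inl ⟨hca, Or.inl hai⟩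
    · exact Or.inl ⟨hca, Or.inr ⟨rfl, by omega⟩⟩
    · exact Or.inr ⟨hca, Or.inl hvt⟩
    · exact Or.inr ⟨hca, Or.inr ⟨hvt, by omega⟩⟩

theorem pvMarked_stepV (floor : List (List String)) (N i j : Int)
    (hi0 : 0 ≤ i) (hiN : i < N) (hc : pvCell floor i j = "|") (hm : pvVT floor j i = i)
    (a b : Int) (ha0 : 0 ≤ a) (haN : a < N) :
    pvMarked floor i (j + 1) a b =
      (pvMarked floor i j a b ||
        (decide (b = j) && decide (i ≤ a) && decide (a < N) && decide (pvVT floor j (a + 1) ≤ i))) := by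
  rw [Bool.eq_iff_iff]
  simp only [pvMarked, Bool.or_eq_true, Bool.and_eq_true, decide_eq_true_iff]
  constructor
  · rintro (⟨hca, (hai | ⟨hae, hhs⟩)⟩ | ⟨hca, (hvt | ⟨hvt, hbj⟩)⟩)
    · exact Or.inl (Or.inl ⟨hca, Or.inl hai⟩)
    · by_cases hlt : pvHS floor a b < j
      · exact Or.inl (Or.inl ⟨hca, Or.inr ⟨hae, hlt⟩⟩)
      · exfalso
        have hbsj : pvHS floor a b = j := by omega
        have hjb : j ≤ b := by have := pvHS_le floor a b; omega
        rcases eq_or_lt_of_le hjb with he | hl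
        · rw [← hae] at hc; rw [he] at hc; exact absurd (hc.symm.trans hca) (by decide)
        · have := pvHS_all floor a b j (le_of_eq hbsj) hl
          rw [← hae] at hc
          exact absurd (hc.symm.trans this) (by decide)
    · exact Or.inl (Or.inr ⟨hca, Or.inl hvt⟩)
    · by_cases hbj' : b < j
      · exact Or.inl (Or.inr ⟨hca, Or.inr ⟨hvt, hbj'⟩⟩)
      · have hbje : b = j := by omega
        subst hbje
        have hia : pvVT floor b a ≤ a := pvVT_le floor b a
        refine Or.inr ⟨⟨⟨rfl, by omega⟩, haN⟩, ?_⟩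
        rw [pvVT_succ floor b a ha0, if_pos hca, hvt]
  · rintro ((⟨hca, (hai | ⟨hae, hhs⟩)⟩ | ⟨hca, (hvt | ⟨hvt, hbj⟩)⟩) | ⟨⟨⟨hbe, hia⟩, _⟩, h4⟩)
    · exact Or.inl ⟨hca, Or.inl hai⟩
    · exact Or.inl ⟨hca, Or.inr ⟨hae, by omega⟩⟩
    · exact Or.inr ⟨hca, Or.inl hvt⟩
    · exact Or.inr ⟨hca, Or.inr ⟨hvt, by omega⟩⟩
    · subst hbe
      have hcb : pvCell floor a b = "|" :=
        pvVT_all floor b (a + 1) a (le_trans h4 hia) (by omega)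
      have hse : pvVT floor b (a + 1) = pvVT floor b a := by
        rw [pvVT_succ floor b a ha0, if_pos hcb]
      have hva1 : pvVT floor b a ≤ i := by rw [← hse]; exact h4
      have hvteq : pvVT floor b a = i := by
        rcases eq_or_lt_of_le hva1 with he | hl
        · exact he
        · exfalso
          have hnn := pvVT_nonneg floor b a ha0
          have hipos : 0 < i := by omega
          have hcell : pvCell floor (i - 1) b = "|" := by
            rcases eq_or_lt_of_le hia with hea | hla
            · exfalso; rw [hea] at hm; omega
            · exact pvVT_all floor b a (i - 1) (by omega) (by omega)
          rcases (pvVT_eq_self_iff floor b i (by omega)).mp hm with h0 | hne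
          · omega
          · exact hne hcell
      exact Or.inr ⟨hcb, Or.inr ⟨hvteq, by omega⟩⟩
theorem pvMarked_noopV (floor : List (List String)) (i j : Int)
    (hi0 : 0 ≤ i) (hc : pvCell floor i j = "|") (hm : pvVT floor j i < i)
    (a b : Int) (ha0 : 0 ≤ a) (hb0 : 0 ≤ b) :
    pvMarked floor i (j + 1) a b = pvMarked floor i j a b := by
  have hipos : 0 < i := by have := pvVT_nonneg floor j i hi0; omega
  have hup : pvCell floor (i - 1) j = "|" := by
    by_contra hne
    exact absurd ((pvVT_eq_self_iff floor j i hi0).mpr (Or.inr hne)) (by omega)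
  rw [Bool.eq_iff_iff]
  simp only [pvMarked, Bool.or_eq_true, Bool.and_eq_true, decide_eq_true_iff]
  constructor
  · rintro (⟨hca, (hai | ⟨rfl, hhs⟩)⟩ | ⟨hca, (hvt | ⟨hvt, hbj⟩)⟩)
    · exact Or.inl ⟨hca, Or.inl hai⟩
    · by_cases hlt : pvHS floor a b < j
      · exact Or.inl ⟨hca, Or.inr ⟨rfl, hlt⟩⟩
      · exfalso
        have hbsj : pvHS floor a b = j := by have := pvHS_le floor a b; omega
        have hjb : j ≤ b := by have := pvHS_le floor a b; omega
        rcases eq_or_lt_of_le hjb with he | hl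
        · subst he; exact absurd (hc.symm.trans hca) (by decide)
        · have := pvHS_all floor a b j (le_of_eq hbsj) hl
          exact absurd (hc.symm.trans this) (by decide)
    · exact Or.inr ⟨hca, Or.inl hvt⟩
    · by_cases hbj' : b < j
      · exact Or.inr ⟨hca, Or.inr ⟨hvt, hbj'⟩⟩
      · exfalso
        have hbje : b = j := by omega
        subst hbje
        have hstop := pvVT_stop floor b a (by rw [hvt]; omega)
        rw [hvt] at hstop
        exact hstop hup
  · rintro (⟨hca, (hai | ⟨rfl, hhs⟩)⟩ | ⟨hca, (hvt | ⟨hvt, hbj⟩)⟩)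
    · exact Or.inl ⟨hca, Or.inl hai⟩
    · exact Or.inl ⟨hca, Or.inr ⟨rfl, by omega⟩⟩
    · exact Or.inr ⟨hca, Or.inl hvt⟩
    · exact Or.inr ⟨hca, Or.inr ⟨hvt, by omega⟩⟩

theorem pvMarked_noopO (floor : List (List String)) (i j : Int)
    (hj0 : 0 ≤ j) (hc1 : pvCell floor i j ≠ "-") (hc2 : pvCell floor i j ≠ "|")
    (a b : Int) (ha0 : 0 ≤ a) (hb0 : 0 ≤ b) :
    pvMarked floor i (j + 1) a b = pvMarked floor i j a b := by
  rw [Bool.eq_iff_iff]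
  simp only [pvMarked, Bool.or_eq_true, Bool.and_eq_true, decide_eq_true_iff]
  constructor
  · rintro (⟨hca, (hai | ⟨rfl, hhs⟩)⟩ | ⟨hca, (hvt | ⟨hvt, hbj⟩)⟩)
    · exact Or.inl ⟨hca, Or.inl hai⟩
    · by_cases hlt : pvHS floor a b < j
      · exact Or.inl ⟨hca, Or.inr ⟨rfl, hlt⟩⟩
      · exfalso
        have hbsj : pvHS floor a b = j := by have := pvHS_le floor a b; omega
        have hjb : j ≤ b := by have := pvHS_le floor a b; omega
        rcases eq_or_lt_of_le hjb with he | hl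
        · subst he; exact hc1 hca
        · exact hc1 (pvHS_all floor a b j (le_of_eq hbsj) hl)
    · exact Or.inr ⟨hca, Or.inl hvt⟩
    · by_cases hbj' : b < j
      · exact Or.inr ⟨hca, Or.inr ⟨hvt, hbj'⟩⟩
      · exfalso
        have hbje : b = j := by omega
        subst hbje
        have hia : pvVT floor b a ≤ a := pvVT_le floor b a
        rcases eq_or_lt_of_le (show i ≤ a by omega) with he | hl
        · subst he; exact hc2 hca
        · exact hc2 (pvVT_all floor b a i (le_of_eq hvt) hl)
  · rintro (⟨hca, (hai | ⟨rfl, hhs⟩)⟩ | ⟨hca, (hvt | ⟨hvt, hbj⟩)⟩)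
    · exact Or.inl ⟨hca, Or.inl hai⟩
    · exact Or.inl ⟨hca, Or.inr ⟨rfl, by omega⟩⟩
    · exact Or.inr ⟨hca, Or.inl hvt⟩
    · exact Or.inr ⟨hca, Or.inr ⟨hvt, by omega⟩⟩


theorem pvStepB_H (floor : List (List String)) (i j : Int) (hj0 : 0 ≤ j)
    (hc : pvCell floor i j = "-") (hm : pvHS floor i j = j) : pvStepB floor i j = 1 := by
  rw [pvStepB, if_pos ⟨hc, (pvHS_eq_self_iff floor i j hj0).mp hm⟩]

theorem pvStepB_noH (floor : List (List String)) (i j : Int) (hj0 : 0 ≤ j)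
    (hc : pvCell floor i j = "-") (hm : pvHS floor i j < j) : pvStepB floor i j = 0 := by
  rw [pvStepB, if_neg (fun hh => absurd ((pvHS_eq_self_iff floor i j hj0).mpr hh.2) (by omega)),
    if_neg (fun hh => absurd (hc.symm.trans hh.1) (by decide))]

theorem pvStepB_V (floor : List (List String)) (i j : Int) (hi0 : 0 ≤ i)
    (hc : pvCell floor i j = "|") (hm : pvVT floor j i = i) : pvStepB floor i j = 1 := by
  rw [pvStepB, if_neg (fun hh => absurd (hh.1.symm.trans hc) (by decide)),
    if_pos ⟨hc, (pvVT_eq_self_iff floor j i hi0).mp hm⟩]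

theorem pvStepB_noV (floor : List (List String)) (i j : Int) (hi0 : 0 ≤ i)
    (hc : pvCell floor i j = "|") (hm : pvVT floor j i < i) : pvStepB floor i j = 0 := by
  rw [pvStepB, if_neg (fun hh => absurd (hh.1.symm.trans hc) (by decide)),
    if_neg (fun hh => absurd ((pvVT_eq_self_iff floor j i hi0).mpr hh.2) (by omega))]

theorem pvStepB_O (floor : List (List String)) (i j : Int)
    (hc1 : pvCell floor i j ≠ "-") (hc2 : pvCell floor i j ≠ "|") : pvStepB floor i j = 0 := by
  rw [pvStepB, if_neg (fun hh => hc1 hh.1), if_neg (fun hh => hc2 hh.1)]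

theorem pvStepA_inv (N M : Int) (floor : List (List String)) (n m : Nat)
    (hN : N ≤ (n : Int)) (hM : M ≤ (m : Int))
    (i j : Int) (hi0 : 0 ≤ i) (hiN : i < N) (hj0 : 0 ≤ j) (hjM : j < M)
    (v : List (List Bool)) (p : Int) (hs : pvShape v n m) (hv : pvInv floor N M i j v) :
    pvShape (pvStepA N M floor i (v, p) j).1 n m ∧
      pvInv floor N M i (j + 1) (pvStepA N M floor i (v, p) j).1 ∧
      (pvStepA N M floor i (v, p) j).2 = p + pvStepB floor i j := by
  have hread : pvVGet v i j = pvMarked floor i j i j := hv i j hi0 hiN hj0 hjM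
  by_cases hc1 : pvCell floor i j = "-"
  · by_cases hm : pvHS floor i j = j
    · -- unmarked left edge of a '-' run: mark the run, planks += 1
      have hmv : pvMarked floor i j i j = false := by simp [pvMarked, hc1, hm]
      have hA : pvStepA N M floor i (v, p) j = (pvMarkH M floor i v j, p + 1) := by
        simp only [pvStepA]; rw [hread, hmv]; simp [hc1]
      rw [hA]
      refine ⟨pvShape_markH M floor i n m v j hs, ?_, by rw [pvStepB_H floor i j hj0 hc1 hm]⟩
      intro a b ha haN hb hbM
      rw [pvMarkH_get M floor i n m hM hi0 (by omega) v j hs hj0 a b ha hb,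
        hv a b ha haN hb hbM,
        pvMarked_stepH floor M i j hj0 hjM hc1 a b hb hbM]
    · have HSlt : pvHS floor i j < j := lt_of_le_of_ne (pvHS_le floor i j) hm
      have hmv : pvMarked floor i j i j = true := by simp [pvMarked, hc1, HSlt]
      have hA : pvStepA N M floor i (v, p) j = (v, p) := by
        simp only [pvStepA]; rw [hread, hmv]; simp
      rw [hA]
      refine ⟨hs, ?_, by rw [pvStepB_noH floor i j hj0 hc1 HSlt]; ring⟩
      intro a b ha haN hb hbM
      rw [hv a b ha haN hb hbM, pvMarked_noopH floor i j hj0 hc1 HSlt a b hb]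
  · by_cases hc2 : pvCell floor i j = "|"
    · by_cases hm : pvVT floor j i = i
      · -- unmarked top edge of a '|' run: mark the run, planks += 1
        have hmv : pvMarked floor i j i j = false := by simp [pvMarked, hc2, hm]
        have hA : pvStepA N M floor i (v, p) j = (pvMarkV N floor j v i, p + 1) := by
          simp only [pvStepA]; rw [hread, hmv]; simp [hc2]
        rw [hA]
        refine ⟨pvShape_markV N floor j n m v i hs, ?_, by rw [pvStepB_V floor i j hi0 hc2 hm]⟩
        intro a b ha haN hb hbM
        rw [pvMarkV_get N floor j n m hN hj0 (by omega) v i hs hi0 a b ha hb,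
          hv a b ha haN hb hbM,
          pvMarked_stepV floor N i j hi0 hiN hc2 hm a b ha haN]
      · have VTlt : pvVT floor j i < i := lt_of_le_of_ne (pvVT_le floor j i) hm
        have hmv : pvMarked floor i j i j = true := by simp [pvMarked, hc2, VTlt]
        have hA : pvStepA N M floor i (v, p) j = (v, p) := by
          simp only [pvStepA]; rw [hread, hmv]; simp
        rw [hA]
        refine ⟨hs, ?_, by rw [pvStepB_noV floor i j hi0 hc2 VTlt]; ring⟩
        intro a b ha haN hb hbM
        rw [hv a b ha haN hb hbM, pvMarked_noopV floor i j hi0 hc2 VTlt a b ha hb]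
    · have hmv : pvMarked floor i j i j = false := by simp [pvMarked, hc1, hc2]
      have hA : pvStepA N M floor i (v, p) j = (v, p) := by
        simp only [pvStepA]; rw [hread, hmv]; simp [hc1, hc2]
      rw [hA]
      refine ⟨hs, ?_, by rw [pvStepB_O floor i j hc1 hc2]; ring⟩
      intro a b ha haN hb hbM
      rw [hv a b ha haN hb hbM, pvMarked_noopO floor i j hj0 hc1 hc2 a b ha hb]
theorem pvFoldRange {σ : Type} (f : σ → Int → σ) (I : Nat → σ → Prop) :
    ∀ (mm : Nat) (s : σ), I 0 s →
      (∀ (k : Nat) (t : σ), k < mm → I k t → I (k + 1) (f t (k : Int))) →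
      I mm ((PySem.List.pyRange 0 ((mm : Nat) : Int) 1).foldl f s) := by
  intro mm
  induction mm with
  | zero =>
    intro s h0 _
    rw [show (((0 : Nat) : Nat) : Int) = 0 by norm_num,
      PySem.List.pyRange_one_eq_nil (le_refl 0)]
    exact h0
  | succ k ih =>
    intro s h0 hstep
    rw [show (((k + 1 : Nat) : Nat) : Int) = (k : Int) + 1 by push_cast; ring,
      PySem.List.pyRange_one_succ_right (by positivity), List.foldl_append]
    simp only [List.foldl_cons, List.foldl_nil]
    exact hstep k _ (by omega) (ih s h0 (fun k' t hk' => hstep k' t (by omega)))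

theorem pvRow (N M : Int) (floor : List (List String)) (n m : Nat)
    (hN : N ≤ (n : Int)) (hM : M ≤ (m : Int)) (i : Int) (hi0 : 0 ≤ i) (hiN : i < N)
    (v : List (List Bool)) (p : Int) (hs : pvShape v n m) (hv : pvInv floor N M i 0 v) :
    pvShape ((PySem.List.pyRange 0 M 1).foldl (pvStepA N M floor i) (v, p)).1 n m ∧
      pvInv floor N M i M ((PySem.List.pyRange 0 M 1).foldl (pvStepA N M floor i) (v, p)).1 ∧
      ((PySem.List.pyRange 0 M 1).foldl (pvStepA N M floor i) (v, p)).2 =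
        (PySem.List.pyRange 0 M 1).foldl (fun q j => q + pvStepB floor i j) p := by
  rcases (show M ≤ 0 ∨ 0 < M by omega) with hM0 | hM0
  · rw [PySem.List.pyRange_one_eq_nil (by omega)]
    exact ⟨hs, fun a b ha haN hb hbM => absurd hbM (by omega), rfl⟩
  · have step : ∀ (k : Nat) (t : List (List Bool) × Int), k < M.toNat →
        (pvShape t.1 n m ∧ pvInv floor N M i ((k : Nat) : Int) t.1 ∧
          t.2 = (PySem.List.pyRange 0 ((k : Nat) : Int) 1).foldl (fun q j => q + pvStepB floor i j) p) →
        (pvShape (pvStepA N M floor i t (k : Int)).1 n m ∧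
          pvInv floor N M i (((k + 1 : Nat) : Nat) : Int) (pvStepA N M floor i t (k : Int)).1 ∧
          (pvStepA N M floor i t (k : Int)).2 =
            (PySem.List.pyRange 0 (((k + 1 : Nat) : Nat) : Int) 1).foldl (fun q j => q + pvStepB floor i j) p) := by
      intro k t hk ht
      obtain ⟨v', p'⟩ := t
      obtain ⟨ts, tv, tp⟩ := ht
      have hk0 : (0 : Int) ≤ (k : Int) := by positivity
      have hkM : (k : Int) < M := by omega
      have main := pvStepA_inv N M floor n m hN hM i (k : Int) hi0 hiN hk0 hkM v' p' ts tv
      have hcast : (((k + 1 : Nat) : Nat) : Int) = (k : Int) + 1 := by push_cast; ring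
      have tp' : p' = (PySem.List.pyRange 0 ((k : Nat) : Int) 1).foldl
          (fun q j => q + pvStepB floor i j) p := tp
      refine ⟨main.1, by rw [hcast]; exact main.2.1, ?_⟩
      rw [main.2.2, tp', hcast, PySem.List.pyRange_one_succ_right hk0, List.foldl_append]
      simp only [List.foldl_cons, List.foldl_nil]
    have key := pvFoldRange (pvStepA N M floor i)
      (fun k s => pvShape s.1 n m ∧ pvInv floor N M i ((k : Nat) : Int) s.1 ∧
        s.2 = (PySem.List.pyRange 0 ((k : Nat) : Int) 1).foldl (fun q j => q + pvStepB floor i j) p)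
      M.toNat (v, p)
      ⟨hs, by exact_mod_cast hv, by rw [show (((0 : Nat) : Nat) : Int) = 0 by norm_num,
        PySem.List.pyRange_one_eq_nil (le_refl 0)]; rfl⟩
      step
    have hMt : ((M.toNat : Nat) : Int) = M := by omega
    have key2 : pvShape ((PySem.List.pyRange 0 ((M.toNat : Nat) : Int) 1).foldl
          (pvStepA N M floor i) (v, p)).1 n m ∧
        pvInv floor N M i ((M.toNat : Nat) : Int)
          ((PySem.List.pyRange 0 ((M.toNat : Nat) : Int) 1).foldl (pvStepA N M floor i) (v, p)).1 ∧
        ((PySem.List.pyRange 0 ((M.toNat : Nat) : Int) 1).foldl (pvStepA N M floor i) (v, p)).2 =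
          (PySem.List.pyRange 0 ((M.toNat : Nat) : Int) 1).foldl
            (fun q j => q + pvStepB floor i j) p := key
    rw [hMt] at key2
    exact key2

theorem pvInv_next (floor : List (List String)) (N M i : Int) (hi0 : 0 ≤ i)
    (v : List (List Bool)) (hv : pvInv floor N M i M v) : pvInv floor N M (i + 1) 0 v := by
  intro a b ha haN hb hbM
  rw [hv a b ha haN hb hbM, Bool.eq_iff_iff]
  simp only [pvMarked, Bool.or_eq_true, Bool.and_eq_true, decide_eq_true_iff]
  constructor
  · rintro (⟨hca, (hai | ⟨hae, _⟩)⟩ | ⟨hca, (hvt | ⟨hvt, _⟩)⟩)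
    · exact Or.inl ⟨hca, Or.inl (by omega)⟩
    · exact Or.inl ⟨hca, Or.inl (by omega)⟩
    · exact Or.inr ⟨hca, Or.inl (by omega)⟩
    · exact Or.inr ⟨hca, Or.inl (by omega)⟩
  · rintro (⟨hca, (hai | ⟨hae, hlt⟩)⟩ | ⟨hca, (hvt | ⟨hvt, hlt⟩)⟩)
    · by_cases h' : a < i
      · exact Or.inl ⟨hca, Or.inl h'⟩
      · exact Or.inl ⟨hca, Or.inr ⟨by omega, by have := pvHS_le floor a b; omega⟩⟩
    · exact absurd hlt (by have := pvHS_nonneg floor a b hb; omega)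
    · by_cases h' : pvVT floor b a < i
      · exact Or.inr ⟨hca, Or.inl h'⟩
      · exact Or.inr ⟨hca, Or.inr ⟨by omega, by omega⟩⟩
    · exact absurd hlt (by omega)

theorem pvInit_shape (N M : Int) :
    pvShape ((PySem.List.pyRange 0 N 1).map (fun _ => (PySem.List.pyRange 0 M 1).map (fun _ => false)))
      N.toNat M.toNat := by
  constructor
  · rw [List.length_map, PySem.List.length_pyRange_one]; omega
  · intro k hk
    rw [List.getElem_map, List.length_map, PySem.List.length_pyRange_one]; omega

theorem pvInit_get (N M : Int) (a b : Int) :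
    pvVGet ((PySem.List.pyRange 0 N 1).map (fun _ => (PySem.List.pyRange 0 M 1).map (fun _ => false)))
      a b = false := by
  rw [pvVGet]
  rcases h1 : PySem.List.pyGet?
      ((PySem.List.pyRange 0 N 1).map (fun _ => (PySem.List.pyRange 0 M 1).map (fun _ => false))) a
    with _ | row
  · simp [PySem.List.pyGet?]
  · have hrow := PySem.List.mem_of_pyGet?_eq_some _ h1
    rw [List.mem_map] at hrow
    obtain ⟨_, _, hre⟩ := hrow
    simp only [Option.getD_some, ← hre]
    rcases h2 : PySem.List.pyGet? ((PySem.List.pyRange 0 M 1).map fun _ => false) b with _ | x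
    · simp
    · have hx := PySem.List.mem_of_pyGet?_eq_some _ h2
      rw [List.mem_map] at hx
      obtain ⟨_, _, hxe⟩ := hx
      simp [← hxe]

theorem pvMarked_zero (floor : List (List String)) (a b : Int) (ha : 0 ≤ a) (hb : 0 ≤ b) :
    pvMarked floor 0 0 a b = false := by
  rw [Bool.eq_false_iff]
  intro hx
  simp only [pvMarked, Bool.or_eq_true, Bool.and_eq_true, decide_eq_true_iff] at hx
  rcases hx with ⟨_, (h | ⟨h, h'⟩)⟩ | ⟨_, (h | ⟨h, h'⟩)⟩
  · omega
  · have := pvHS_nonneg floor a b hb; omega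
  · have := pvVT_nonneg floor b a ha; omega
  · omega

theorem pvMain (N M : Int) (floor : List (List String)) : dfs N M floor = dfs_alt N M floor := by
  unfold dfs dfs_alt
  set v0 := (PySem.List.pyRange 0 N 1).map (fun _ => (PySem.List.pyRange 0 M 1).map (fun _ => false)) with hv0
  have hshape : pvShape v0 N.toNat M.toNat := pvInit_shape N M
  have hinv : pvInv floor N M 0 0 v0 := by
    intro a b ha _ hb _
    rw [hv0, pvInit_get, pvMarked_zero floor a b ha hb]
  rcases (show N ≤ 0 ∨ 0 < N by omega) with hN0 | hN0
  · rw [PySem.List.pyRange_one_eq_nil (show N ≤ 0 by omega)]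
    simp
  · have step : ∀ (k : Nat) (t : List (List Bool) × Int), k < N.toNat →
        (pvShape t.1 N.toNat M.toNat ∧ pvInv floor N M ((k : Nat) : Int) 0 t.1 ∧
          t.2 = (PySem.List.pyRange 0 ((k : Nat) : Int) 1).foldl
            (fun p i => (PySem.List.pyRange 0 M 1).foldl (fun p j => p + pvStepB floor i j) p) 0) →
        (pvShape ((PySem.List.pyRange 0 M 1).foldl (pvStepA N M floor (k : Int)) t).1 N.toNat M.toNat ∧
          pvInv floor N M (((k + 1 : Nat) : Nat) : Int) 0
            ((PySem.List.pyRange 0 M 1).foldl (pvStepA N M floor (k : Int)) t).1 ∧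
          ((PySem.List.pyRange 0 M 1).foldl (pvStepA N M floor (k : Int)) t).2 =
            (PySem.List.pyRange 0 (((k + 1 : Nat) : Nat) : Int) 1).foldl
              (fun p i => (PySem.List.pyRange 0 M 1).foldl (fun p j => p + pvStepB floor i j) p) 0) := by
      intro k t hk ht
      obtain ⟨v', p'⟩ := t
      obtain ⟨ts, tv, tp⟩ := ht
      have hk0 : (0 : Int) ≤ (k : Int) := by positivity
      have hkN : (k : Int) < N := by omega
      have row := pvRow N M floor N.toNat M.toNat (by omega) (by omega) (k : Int) hk0 hkN v' p' ts tv
      have hcast : (((k + 1 : Nat) : Nat) : Int) = (k : Int) + 1 := by push_cast; ring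
      have tp' : p' = (PySem.List.pyRange 0 ((k : Nat) : Int) 1).foldl
          (fun p i => (PySem.List.pyRange 0 M 1).foldl (fun p j => p + pvStepB floor i j) p) 0 := tp
      refine ⟨row.1, ?_, ?_⟩
      · rw [hcast]
        exact pvInv_next floor N M (k : Int) hk0 _ row.2.1
      · rw [row.2.2, tp', hcast, PySem.List.pyRange_one_succ_right hk0, List.foldl_append]
        simp only [List.foldl_cons, List.foldl_nil]
    have key := pvFoldRange
      (fun s i => (PySem.List.pyRange 0 M 1).foldl (pvStepA N M floor i) s)
      (fun k s => pvShape s.1 N.toNat M.toNat ∧ pvInv floor N M ((k : Nat) : Int) 0 s.1 ∧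
        s.2 = (PySem.List.pyRange 0 ((k : Nat) : Int) 1).foldl
          (fun p i => (PySem.List.pyRange 0 M 1).foldl (fun p j => p + pvStepB floor i j) p) 0)
      N.toNat (v0, 0)
      ⟨hshape, by exact_mod_cast hinv, by rw [show (((0 : Nat) : Nat) : Int) = 0 by norm_num,
        PySem.List.pyRange_one_eq_nil (le_refl 0)]; rfl⟩
      step
    have hNt : ((N.toNat : Nat) : Int) = N := by omega
    have key2 : ((PySem.List.pyRange 0 ((N.toNat : Nat) : Int) 1).foldl
          (fun s i => (PySem.List.pyRange 0 M 1).foldl (pvStepA N M floor i) s) (v0, 0)).2 =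
        (PySem.List.pyRange 0 ((N.toNat : Nat) : Int) 1).foldl
          (fun p i => (PySem.List.pyRange 0 M 1).foldl (fun p j => p + pvStepB floor i j) p) 0 :=
      key.2.2
    rw [hNt] at key2
    exact key2

-- ===== VERDICT (by name: the statement is the Claim_ definition above) =====
theorem dfs_spec : Claim_equal_dfs := by
  intro N M floor _ _
  unfold Spec_dfs
  exact pvMain N M floor
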